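-- pv_equiv track=rewrite | github.com/treeleaves30760/NNUE-mlx | src/search/evaluator.py | _chess_knight_outposts
-- ===== SOURCE A (Python) =====
-- from typing import List, Optional
--
-- def _chess_knight_outposts(white_knight_squares: List[int],
--                             black_knight_squares: List[int],
--                             white_pawn_squares: List[int],
--                             black_pawn_squares: List[int]) -> int:
--     """Bonus for knights parked on a supported, unattackable outpost.
--
--     An outpost is a square in the opponent's half of the board where
--     the knight is defended by a friendly pawn AND cannot be chased
--     away by an enemy pawn (no enemy pawn on the adjacent files far
--     enough forward to attack the square in one or two pushes). Outposts
--     are among the strongest positional assets in the middlegame — the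
--     knight can't be exchanged by a minor piece on equal terms and
--     controls 8 squares from a secure base.
--     """
--     score = 0
--     w_pawn_set = set(white_pawn_squares)
--     b_pawn_set = set(black_pawn_squares)
--
--     for sq in white_knight_squares:
--         f, r = sq % 8, sq // 8
--         if r < 4:
--             continue  # not in enemy half
--         supported = False
--         if r > 0:
--             if f > 0 and ((r - 1) * 8 + (f - 1)) in w_pawn_set:
--                 supported = True
--             elif f < 7 and ((r - 1) * 8 + (f + 1)) in w_pawn_set:
--                 supported = True
--         if not supported:
--             continue
--         safe = True
--         for df in (-1, 1):
--             nf = f + df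
--             if not (0 <= nf < 8):
--                 continue
--             # Any black pawn on this file above (larger rank) could chase.
--             for nr in range(r + 1, 8):
--                 if (nr * 8 + nf) in b_pawn_set:
--                     safe = False
--                     break
--             if not safe:
--                 break
--         if safe:
--             # Extra bonus for advanced outpost.
--             score += 20 + (r - 4) * 5
--
--     for sq in black_knight_squares:
--         f, r = sq % 8, sq // 8
--         if r > 3:
--             continue
--         supported = False
--         if r < 7:
--             if f > 0 and ((r + 1) * 8 + (f - 1)) in b_pawn_set:
--                 supported = True
--             elif f < 7 and ((r + 1) * 8 + (f + 1)) in b_pawn_set: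
--                 supported = True
--         if not supported:
--             continue
--         safe = True
--         for df in (-1, 1):
--             nf = f + df
--             if not (0 <= nf < 8):
--                 continue
--             for nr in range(r - 1, -1, -1):
--                 if (nr * 8 + nf) in w_pawn_set:
--                     safe = False
--                     break
--             if not safe:
--                 break
--         if safe:
--             score -= 20 + (3 - r) * 5
--
--     return score
-- ===== SOURCE B (Python) =====
-- from typing import List
--
-- def _chess_knight_outposts(white_knight_squares: List[int],
--                             black_knight_squares: List[int],
--                             white_pawn_squares: List[int],
--                             black_pawn_squares: List[int]) -> int:
--     """Same outpost scoring, but the per-knight rank scan is replaced by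
--     two per-file tables built in single passes over the pawn lists."""
--     w_pawn_set = set(white_pawn_squares)
--     b_pawn_set = set(black_pawn_squares)
--
--     # Per file 0..7: highest rank of any on-board black pawn (-1 = none),
--     # lowest rank of any on-board white pawn (8 = none).
--     max_black_rank = [-1] * 8
--     for sq in black_pawn_squares:
--         if 0 <= sq < 64:
--             f, r = sq % 8, sq // 8
--             if r > max_black_rank[f]:
--                 max_black_rank[f] = r
--     min_white_rank = [8] * 8
--     for sq in white_pawn_squares:
--         if 0 <= sq < 64:
--             f, r = sq % 8, sq // 8
--             if r < min_white_rank[f]: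
--                 min_white_rank[f] = r
--
--     score = 0
--     for sq in white_knight_squares:
--         f, r = sq % 8, sq // 8
--         if r < 4:
--             continue
--         supported = ((f > 0 and (r - 1) * 8 + (f - 1) in w_pawn_set)
--                      or (f < 7 and (r - 1) * 8 + (f + 1) in w_pawn_set))
--         if not supported:
--             continue
--         if any(0 <= f + df < 8 and max_black_rank[f + df] > r for df in (-1, 1)):
--             continue
--         score += 20 + (r - 4) * 5
--
--     for sq in black_knight_squares:
--         f, r = sq % 8, sq // 8
--         if r > 3:
--             continue
--         supported = ((f > 0 and (r + 1) * 8 + (f - 1) in b_pawn_set)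
--                      or (f < 7 and (r + 1) * 8 + (f + 1) in b_pawn_set))
--         if not supported:
--             continue
--         if any(0 <= f + df < 8 and min_white_rank[f + df] < r for df in (-1, 1)):
--             continue
--         score -= 20 + (3 - r) * 5
--
--     return score
-- ===== Notes on version B (the rewrite author's own statement) =====
-- stated objective: simpler
-- what changed: B precomputes two per-file pawn-extremum tables (max black-pawn rank, min white-pawn rank) in single passes over the pawn lists and replaces A's per-knight nested scan over forward ranks on each adjacent file with one table comparison; the elif-chained supported flag collapses to a plain disjunction.
import Mathlib
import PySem

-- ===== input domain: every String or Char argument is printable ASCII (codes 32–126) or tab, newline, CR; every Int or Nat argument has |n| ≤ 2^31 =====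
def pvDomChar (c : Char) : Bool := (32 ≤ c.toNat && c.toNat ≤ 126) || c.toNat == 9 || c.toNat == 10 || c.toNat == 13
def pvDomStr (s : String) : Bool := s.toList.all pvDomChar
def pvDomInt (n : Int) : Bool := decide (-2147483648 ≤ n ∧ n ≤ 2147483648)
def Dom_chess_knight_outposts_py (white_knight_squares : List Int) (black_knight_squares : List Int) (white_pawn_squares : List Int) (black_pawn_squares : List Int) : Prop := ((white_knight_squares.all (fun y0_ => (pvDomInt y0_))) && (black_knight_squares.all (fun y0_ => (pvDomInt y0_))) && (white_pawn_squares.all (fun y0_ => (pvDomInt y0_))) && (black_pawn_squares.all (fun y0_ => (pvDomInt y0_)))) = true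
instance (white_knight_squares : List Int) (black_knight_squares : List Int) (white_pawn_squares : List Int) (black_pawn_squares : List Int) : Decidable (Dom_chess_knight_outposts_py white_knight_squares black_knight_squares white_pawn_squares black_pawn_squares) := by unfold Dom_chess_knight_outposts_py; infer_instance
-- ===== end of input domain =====

-- B replaces A's per-knight scan of enemy ranks with two per-file pawn-extremum
-- tables built once over the pawn lists (objective: simpler per-knight check).


-- ===== PORT A =====
-- body of A's white-knight loop (score accumulator, one knight square)
def pyAWStep (wset bset : PySem.Set Int) (score sq : Int) : Int :=
  let f := PySem.Int.mod sq 8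
  let r := PySem.Int.floordiv sq 8
  if r < 4 then score
  else
    let supported : Bool :=
      if r > 0 then
        if f > 0 && wset.contains ((r - 1) * 8 + (f - 1)) then true
        else if f < 7 && wset.contains ((r - 1) * 8 + (f + 1)) then true
        else false
      else false
    if !supported then score
    else
      let safe : Bool :=
        !(([-1, 1] : List Int).any fun df =>
          let nf := f + df
          if 0 ≤ nf ∧ nf < 8 then
            (PySem.List.pyRange (r + 1) 8 1).any fun nr => bset.contains (nr * 8 + nf)
          else false)
      if safe then score + (20 + (r - 4) * 5) else score

-- body of A's black-knight loop
def pyABStep (wset bset : PySem.Set Int) (score sq : Int) : Int :=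
  let f := PySem.Int.mod sq 8
  let r := PySem.Int.floordiv sq 8
  if r > 3 then score
  else
    let supported : Bool :=
      if r < 7 then
        if f > 0 && bset.contains ((r + 1) * 8 + (f - 1)) then true
        else if f < 7 && bset.contains ((r + 1) * 8 + (f + 1)) then true
        else false
      else false
    if !supported then score
    else
      let safe : Bool :=
        !(([-1, 1] : List Int).any fun df =>
          let nf := f + df
          if 0 ≤ nf ∧ nf < 8 then
            (PySem.List.pyRange (r - 1) (-1) (-1)).any fun nr => wset.contains (nr * 8 + nf)
          else false)
      if safe then score - (20 + (3 - r) * 5) else score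

def chess_knight_outposts_py (white_knight_squares : List Int) (black_knight_squares : List Int) (white_pawn_squares : List Int) (black_pawn_squares : List Int) : Int :=
  let wset := PySem.Set.ofList white_pawn_squares
  let bset := PySem.Set.ofList black_pawn_squares
  black_knight_squares.foldl (pyABStep wset bset)
    (white_knight_squares.foldl (pyAWStep wset bset) 0)

-- ===== PORT B =====
-- per file x: highest rank of an on-board black pawn (-1 = none)
def pvMaxBlackRank : List Int → Int → Int
  | [], _ => -1
  | sq :: tl, x =>
    let m := pvMaxBlackRank tl x
    if 0 ≤ sq ∧ sq < 64 then
      if PySem.Int.mod sq 8 = x ∧ PySem.Int.floordiv sq 8 > m then PySem.Int.floordiv sq 8 else m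
    else m

-- per file x: lowest rank of an on-board white pawn (8 = none)
def pvMinWhiteRank : List Int → Int → Int
  | [], _ => 8
  | sq :: tl, x =>
    let m := pvMinWhiteRank tl x
    if 0 ≤ sq ∧ sq < 64 then
      if PySem.Int.mod sq 8 = x ∧ PySem.Int.floordiv sq 8 < m then PySem.Int.floordiv sq 8 else m
    else m

-- body of B's white-knight loop: table lookup instead of a rank scan
def pyBWStep (wset : PySem.Set Int) (maxb : Int → Int) (score sq : Int) : Int :=
  let f := PySem.Int.mod sq 8
  let r := PySem.Int.floordiv sq 8
  if r < 4 then score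
  else
    let supported : Bool :=
      (f > 0 && wset.contains ((r - 1) * 8 + (f - 1))) ||
      (f < 7 && wset.contains ((r - 1) * 8 + (f + 1)))
    if !supported then score
    else if ([-1, 1] : List Int).any (fun df => decide (0 ≤ f + df ∧ f + df < 8 ∧ maxb (f + df) > r)) then score
    else score + (20 + (r - 4) * 5)

-- body of B's black-knight loop
def pyBBStep (bset : PySem.Set Int) (minw : Int → Int) (score sq : Int) : Int :=
  let f := PySem.Int.mod sq 8
  let r := PySem.Int.floordiv sq 8
  if r > 3 then score
  else
    let supported : Bool :=
      (f > 0 && bset.contains ((r + 1) * 8 + (f - 1))) ||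
      (f < 7 && bset.contains ((r + 1) * 8 + (f + 1)))
    if !supported then score
    else if ([-1, 1] : List Int).any (fun df => decide (0 ≤ f + df ∧ f + df < 8 ∧ minw (f + df) < r)) then score
    else score - (20 + (3 - r) * 5)

def chess_knight_outposts_py_alt (white_knight_squares : List Int) (black_knight_squares : List Int) (white_pawn_squares : List Int) (black_pawn_squares : List Int) : Int :=
  let wset := PySem.Set.ofList white_pawn_squares
  let bset := PySem.Set.ofList black_pawn_squares
  let maxb := pvMaxBlackRank black_pawn_squares
  let minw := pvMinWhiteRank white_pawn_squares
  black_knight_squares.foldl (pyBBStep bset minw)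
    (white_knight_squares.foldl (pyBWStep wset maxb) 0)

-- ===== PRECONDITION & SPEC =====
def Spec_chess_knight_outposts_py (white_knight_squares : List Int) (black_knight_squares : List Int) (white_pawn_squares : List Int) (black_pawn_squares : List Int) (out : Int) : Prop := out = chess_knight_outposts_py_alt white_knight_squares black_knight_squares white_pawn_squares black_pawn_squares
instance (white_knight_squares : List Int) (black_knight_squares : List Int) (white_pawn_squares : List Int) (black_pawn_squares : List Int) (out : Int) : Decidable (Spec_chess_knight_outposts_py white_knight_squares black_knight_squares white_pawn_squares black_pawn_squares out) := by unfold Spec_chess_knight_outposts_py; infer_instance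

-- ===== CLAIM (what is proved, stated in full; the proofs are below) =====
def Claim_equal_chess_knight_outposts_py : Prop := ∀ (white_knight_squares : List Int) (black_knight_squares : List Int) (white_pawn_squares : List Int) (black_pawn_squares : List Int), Dom_chess_knight_outposts_py white_knight_squares black_knight_squares white_pawn_squares black_pawn_squares → Spec_chess_knight_outposts_py white_knight_squares black_knight_squares white_pawn_squares black_pawn_squares (chess_knight_outposts_py white_knight_squares black_knight_squares white_pawn_squares black_pawn_squares)

-- ===== LEMMAS AND PROOFS =====
theorem maxBlackRank_gt (bp : List Int) (x r : Int) (hr : -1 ≤ r) :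
    pvMaxBlackRank bp x > r ↔ ∃ sq ∈ bp, 0 ≤ sq ∧ sq < 64 ∧ sq % 8 = x ∧ sq / 8 > r := by
  induction bp with
  | nil => simp [pvMaxBlackRank]; omega
  | cons sq tl ih =>
    have hm : PySem.Int.mod sq 8 = sq % 8 := PySem.Int.mod_eq_emod_of_pos (by norm_num)
    have hd : PySem.Int.floordiv sq 8 = sq / 8 := PySem.Int.floordiv_eq_ediv_of_pos (by norm_num)
    simp only [pvMaxBlackRank, hm, hd, List.exists_mem_cons_iff, ← ih]
    split_ifs with h1 h2 <;> constructor <;> intro h <;>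
      first
        | (rcases h with h | h) <;> omega
        | omega

theorem minWhiteRank_lt (wp : List Int) (x r : Int) (hr : r ≤ 8) :
    pvMinWhiteRank wp x < r ↔ ∃ sq ∈ wp, 0 ≤ sq ∧ sq < 64 ∧ sq % 8 = x ∧ sq / 8 < r := by
  induction wp with
  | nil => simp [pvMinWhiteRank]; omega
  | cons sq tl ih =>
    have hm : PySem.Int.mod sq 8 = sq % 8 := PySem.Int.mod_eq_emod_of_pos (by norm_num)
    have hd : PySem.Int.floordiv sq 8 = sq / 8 := PySem.Int.floordiv_eq_ediv_of_pos (by norm_num)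
    simp only [pvMinWhiteRank, hm, hd, List.exists_mem_cons_iff, ← ih]
    split_ifs with h1 h2 <;> constructor <;> intro h <;>
      first
        | (rcases h with h | h) <;> omega
        | omega

theorem chase_white (bp : List Int) (nf r : Int) (hr : 4 ≤ r) :
    (if 0 ≤ nf ∧ nf < 8 then
        (PySem.List.pyRange (r + 1) 8 1).any fun nr => (PySem.Set.ofList bp).contains (nr * 8 + nf)
      else false)
      = decide (0 ≤ nf ∧ nf < 8 ∧ pvMaxBlackRank bp nf > r) := by
  by_cases h : 0 ≤ nf ∧ nf < 8
  · rw [if_pos h, Bool.eq_iff_iff]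
    simp only [List.any_eq_true, PySem.List.mem_pyRange_one, decide_eq_true_eq,
      PySem.Set.contains, PySem.Set.mem_ofList, List.contains_iff_mem,
      maxBlackRank_gt bp nf r (by omega)]
    constructor
    · rintro ⟨nr, ⟨h1, h2⟩, hmem⟩
      exact ⟨h.1, h.2, nr * 8 + nf, hmem, by omega, by omega, by omega, by omega⟩
    · rintro ⟨-, -, sq, hmem, h0, h64, hfile, hrank⟩
      exact ⟨sq / 8, ⟨by omega, by omega⟩, by have := Int.emod_add_mul_ediv sq 8; simpa [show sq / 8 * 8 + nf = sq by omega] using hmem⟩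
  · rw [if_neg h]; exact (decide_eq_false (by tauto)).symm

theorem chase_black (wp : List Int) (nf r : Int) (hr : r ≤ 3) :
    (if 0 ≤ nf ∧ nf < 8 then
        (PySem.List.pyRange (r - 1) (-1) (-1)).any fun nr => (PySem.Set.ofList wp).contains (nr * 8 + nf)
      else false)
      = decide (0 ≤ nf ∧ nf < 8 ∧ pvMinWhiteRank wp nf < r) := by
  by_cases h : 0 ≤ nf ∧ nf < 8
  · rw [if_pos h, Bool.eq_iff_iff]
    simp only [List.any_eq_true, PySem.List.mem_pyRange_neg_one, decide_eq_true_eq,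
      PySem.Set.contains, PySem.Set.mem_ofList, List.contains_iff_mem,
      minWhiteRank_lt wp nf r (by omega)]
    constructor
    · rintro ⟨nr, ⟨h1, h2⟩, hmem⟩
      exact ⟨h.1, h.2, nr * 8 + nf, hmem, by omega, by omega, by omega, by omega⟩
    · rintro ⟨-, -, sq, hmem, h0, h64, hfile, hrank⟩
      exact ⟨sq / 8, ⟨by omega, by omega⟩, by have := Int.emod_add_mul_ediv sq 8; simpa [show sq / 8 * 8 + nf = sq by omega] using hmem⟩
  · rw [if_neg h]; exact (decide_eq_false (by tauto)).symm

theorem wstep_eq (wp bp : List Int) (score sq : Int) :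
    pyAWStep (PySem.Set.ofList wp) (PySem.Set.ofList bp) score sq
      = pyBWStep (PySem.Set.ofList wp) (pvMaxBlackRank bp) score sq := by
  unfold pyAWStep pyBWStep
  set f := PySem.Int.mod sq 8 with hf
  set r := PySem.Int.floordiv sq 8 with hrdef
  by_cases h4 : r < 4
  · simp [h4]
  · have hr : 4 ≤ r := by omega
    rw [if_neg h4, if_neg h4, if_pos (by omega : r > 0)]
    have hsup : (if (decide (f > 0) && (PySem.Set.ofList wp).contains ((r - 1) * 8 + (f - 1))) = true then true
        else if (decide (f < 7) && (PySem.Set.ofList wp).contains ((r - 1) * 8 + (f + 1))) = true then true else false)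
        = ((decide (f > 0) && (PySem.Set.ofList wp).contains ((r - 1) * 8 + (f - 1))) ||
           (decide (f < 7) && (PySem.Set.ofList wp).contains ((r - 1) * 8 + (f + 1)))) := by
      cases (decide (f > 0) && (PySem.Set.ofList wp).contains ((r - 1) * 8 + (f - 1))) <;> simp
    rw [hsup]
    have hany : (([-1, 1] : List Int).any fun df =>
        let nf := f + df
        if 0 ≤ nf ∧ nf < 8 then
          (PySem.List.pyRange (r + 1) 8 1).any fun nr => (PySem.Set.ofList bp).contains (nr * 8 + nf)
        else false)
        = ([-1, 1] : List Int).any (fun df => decide (0 ≤ f + df ∧ f + df < 8 ∧ pvMaxBlackRank bp (f + df) > r)) := by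
      simp only [List.any_cons, List.any_nil]
      rw [chase_white bp (f + -1) r hr, chase_white bp (f + 1) r hr]
    rw [hany]
    cases hs : ((decide (f > 0) && (PySem.Set.ofList wp).contains ((r - 1) * 8 + (f - 1))) ||
           (decide (f < 7) && (PySem.Set.ofList wp).contains ((r - 1) * 8 + (f + 1)))) <;>
      cases ha : ([-1, 1] : List Int).any (fun df => decide (0 ≤ f + df ∧ f + df < 8 ∧ pvMaxBlackRank bp (f + df) > r)) <;>
      simp

theorem bstep_eq (wp bp : List Int) (score sq : Int) :
    pyABStep (PySem.Set.ofList wp) (PySem.Set.ofList bp) score sq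
      = pyBBStep (PySem.Set.ofList bp) (pvMinWhiteRank wp) score sq := by
  unfold pyABStep pyBBStep
  set f := PySem.Int.mod sq 8 with hf
  set r := PySem.Int.floordiv sq 8 with hrdef
  by_cases h4 : r > 3
  · simp [h4]
  · have hr : r ≤ 3 := by omega
    rw [if_neg h4, if_neg h4, if_pos (by omega : r < 7)]
    have hsup : (if (decide (f > 0) && (PySem.Set.ofList bp).contains ((r + 1) * 8 + (f - 1))) = true then true
        else if (decide (f < 7) && (PySem.Set.ofList bp).contains ((r + 1) * 8 + (f + 1))) = true then true else false)
        = ((decide (f > 0) && (PySem.Set.ofList bp).contains ((r + 1) * 8 + (f - 1))) ||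
           (decide (f < 7) && (PySem.Set.ofList bp).contains ((r + 1) * 8 + (f + 1)))) := by
      cases (decide (f > 0) && (PySem.Set.ofList bp).contains ((r + 1) * 8 + (f - 1))) <;> simp
    rw [hsup]
    have hany : (([-1, 1] : List Int).any fun df =>
        let nf := f + df
        if 0 ≤ nf ∧ nf < 8 then
          (PySem.List.pyRange (r - 1) (-1) (-1)).any fun nr => (PySem.Set.ofList wp).contains (nr * 8 + nf)
        else false)
        = ([-1, 1] : List Int).any (fun df => decide (0 ≤ f + df ∧ f + df < 8 ∧ pvMinWhiteRank wp (f + df) < r)) := by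
      simp only [List.any_cons, List.any_nil]
      rw [chase_black wp (f + -1) r hr, chase_black wp (f + 1) r hr]
    rw [hany]
    cases hs : ((decide (f > 0) && (PySem.Set.ofList bp).contains ((r + 1) * 8 + (f - 1))) ||
           (decide (f < 7) && (PySem.Set.ofList bp).contains ((r + 1) * 8 + (f + 1)))) <;>
      cases ha : ([-1, 1] : List Int).any (fun df => decide (0 ≤ f + df ∧ f + df < 8 ∧ pvMinWhiteRank wp (f + df) < r)) <;>
      simp

-- ===== VERDICT (by name: the statement is the Claim_ definition above) =====
theorem chess_knight_outposts_py_spec : Claim_equal_chess_knight_outposts_py := by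
  intro wn bn wp bp _
  unfold Spec_chess_knight_outposts_py chess_knight_outposts_py chess_knight_outposts_py_alt
  have hw : pyAWStep (PySem.Set.ofList wp) (PySem.Set.ofList bp)
      = pyBWStep (PySem.Set.ofList wp) (pvMaxBlackRank bp) := by
    funext score sq; exact wstep_eq wp bp score sq
  have hb : pyABStep (PySem.Set.ofList wp) (PySem.Set.ofList bp)
      = pyBBStep (PySem.Set.ofList bp) (pvMinWhiteRank wp) := by
    funext score sq; exact bstep_eq wp bp score sq
  simp only [hw, hb]
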